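-- pv_equiv track=rewrite | github.com/EnterPC-Core/jarvis_portable_2026-03-24 | legacy_jarvis_adapter.py | analyze_message_quality
-- ===== SOURCE A (Python) =====
-- def analyze_message_quality(text: str) -> int:
--     normalized = " ".join((text or "").lower().split())
--     if len(normalized) < 4:
--         return 0
--     score = 1
--     if len(normalized) >= 80:
--         score += 1
--     if len(normalized) >= 220:
--         score += 1
--     if any(token in normalized for token in ("http://", "https://", "решение", "ошибка", "проверь", "совет", "источник")):
--         score += 1
--     return min(score, 4)
-- ===== SOURCE B (Python) =====
-- KEYWORDS = ("http://", "https://", "решение", "ошибка", "проверь", "совет", "источник")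
--
--
-- def analyze_message_quality(text: str) -> int:
--     # Work on the word list directly; the joined normalized string is never built.
--     words = (text or "").lower().split()
--     # length of " ".join(words), computed arithmetically
--     n = sum(len(w) for w in words) + len(words) - 1
--     if n < 4:
--         length_score = 0
--     elif n < 80:
--         length_score = 1
--     elif n < 220:
--         length_score = 2
--     else:
--         length_score = 3
--     # no keyword contains a space, so a per-word scan equals the joined-string scan
--     has_keyword = any(t in w for w in words for t in KEYWORDS)
--     return length_score + int(has_keyword)
-- ===== Notes on version B (the rewrite author's own statement) =====
-- stated objective: alternative
-- what changed: B never materializes the normalized string: it scores directly on the word list, computing the joined length arithmetically (sum of word lengths plus separator count) and scanning for keywords per word, which is equivalent because no keyword contains a space and every keyword has at least 5 characters.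
import Mathlib
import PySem

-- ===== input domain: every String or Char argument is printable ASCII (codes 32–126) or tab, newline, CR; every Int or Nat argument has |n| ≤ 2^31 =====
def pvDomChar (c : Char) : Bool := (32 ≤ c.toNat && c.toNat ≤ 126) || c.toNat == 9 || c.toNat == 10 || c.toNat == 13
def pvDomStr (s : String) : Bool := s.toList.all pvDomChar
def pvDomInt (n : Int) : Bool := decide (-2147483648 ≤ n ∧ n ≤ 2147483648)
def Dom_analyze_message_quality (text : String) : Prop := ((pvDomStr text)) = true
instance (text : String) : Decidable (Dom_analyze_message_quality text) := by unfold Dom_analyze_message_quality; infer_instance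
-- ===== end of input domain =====

-- B scores on the word list directly instead of building the normalized joined string:
-- the joined length is computed arithmetically and keywords are scanned per word
-- (no keyword contains a space); objective: alternative decomposition, same cost.


-- the keyword tuple, shared verbatim by both programs
def pvTokens : List String := ["http://", "https://", "решение", "ошибка", "проверь", "совет", "источник"]

-- ===== PORT A =====
def analyze_message_quality (text : String) : Int :=
  let normalized := PySem.Str.join " " (PySem.Str.split₀ (PySem.Str.lower text))
  if PySem.Str.len normalized < 4 then 0
  else
    let score : Int := 1
    let score := if 80 ≤ PySem.Str.len normalized then score + 1 else score
    let score := if 220 ≤ PySem.Str.len normalized then score + 1 else score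
    let score := if pvTokens.any (fun token => PySem.Str.isIn token normalized) then score + 1 else score
    min score 4

-- ===== PORT B =====
def analyze_message_quality_alt (text : String) : Int :=
  let words := PySem.Str.split₀ (PySem.Str.lower text)
  let n : Int := (words.map (fun w => PySem.Str.len w)).sum + words.length - 1
  let length_score : Int := if n < 4 then 0 else if n < 80 then 1 else if n < 220 then 2 else 3
  let has_keyword := words.any (fun w => pvTokens.any (fun t => PySem.Str.isIn t w))
  length_score + (if has_keyword then 1 else 0)

-- ===== PRECONDITION & SPEC =====
def Spec_analyze_message_quality (text : String) (out : Int) : Prop := out = analyze_message_quality_alt text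
instance (text : String) (out : Int) : Decidable (Spec_analyze_message_quality text out) := by unfold Spec_analyze_message_quality; infer_instance

-- ===== CLAIM (what is proved, stated in full; the proofs are below) =====
def Claim_equal_analyze_message_quality : Prop := ∀ (text : String), Dom_analyze_message_quality text → Spec_analyze_message_quality text (analyze_message_quality text)

-- ===== LEMMAS AND PROOFS =====

-- every keyword is at least 5 chars long and contains no space
theorem pvTokens_facts : ∀ tok ∈ pvTokens, 5 ≤ tok.toList.length ∧ ' ' ∉ tok.toList := by decide

-- length of " ".join(ws) for nonempty ws, arithmetically
theorem pv_join_len_nat : ∀ (ws : List (List Char)), ws ≠ [] →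
    (PySem.Chars.join [' '] ws).length + 1 = (ws.map List.length).sum + ws.length := by
  intro ws
  induction ws with
  | nil => intro h; exact absurd rfl h
  | cons a rest ih =>
    intro _
    cases rest with
    | nil => simp [PySem.Chars.join_singleton]
    | cons b r =>
      rw [PySem.Chars.join_cons_cons]
      have ih' := ih (by simp)
      simp only [List.length_append, List.map_cons, List.sum_cons, List.length_cons,
        List.length_nil] at ih' ⊢
      omega

theorem pv_join_len (ws : List (List Char)) (h : ws ≠ []) :
    ((PySem.Chars.join [' '] ws).length : Int) = ((ws.map List.length).sum : Int) + ws.length - 1 := by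
  have := pv_join_len_nat ws h
  omega

-- an infix containing no space of xs ++ ' ' :: ys is an infix of xs or of ys
theorem pv_infix_split (tok xs ys : List Char) (hns : ' ' ∉ tok)
    (h : tok <:+: xs ++ ' ' :: ys) : tok <:+: xs ∨ tok <:+: ys := by
  obtain ⟨s, t, hst⟩ := h
  by_cases h1 : s.length + tok.length ≤ xs.length
  · left
    have hpre : s ++ tok <+: xs ++ ' ' :: ys := ⟨t, by simpa [List.append_assoc] using hst⟩
    have hxs : xs <+: xs ++ ' ' :: ys := ⟨' ' :: ys, rfl⟩
    have hst' : s ++ tok <+: xs :=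
      List.prefix_of_prefix_length_le hpre hxs (by simpa using h1)
    have htk : tok <:+: s ++ tok := ⟨s, [], by simp⟩
    exact List.IsInfix.trans htk hst'.isInfix
  · by_cases h2 : xs.length + 1 ≤ s.length
    · right
      have hys : ys = (s ++ tok ++ t).drop (xs.length + 1) := by
        rw [hst]; simp
      rw [hys, List.append_assoc, List.drop_append_of_le_length (by omega)]
      exact ⟨s.drop (xs.length + 1), t, by simp⟩
    · exfalso
      have hlen : (s ++ tok ++ t).length = (xs ++ ' ' :: ys).length := by rw [hst]
      have hb : xs.length < (s ++ tok ++ t).length := by simp at hlen ⊢; omega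
      have hget : (s ++ tok ++ t)[xs.length]'hb = (xs ++ ' ' :: ys)[xs.length]'(by simp) :=
        List.getElem_of_eq hst _
      have hr : (xs ++ ' ' :: ys)[xs.length]'(by simp) = ' ' := by
        rw [List.getElem_append_right (by omega)]; simp
      have hl : (s ++ tok ++ t)[xs.length]'hb = tok[xs.length - s.length]'(by omega) := by
        rw [List.getElem_append_left (by simp; omega), List.getElem_append_right (by omega)]
      have hsp : tok[xs.length - s.length]'(by omega) = ' ' := by rw [← hl, hget, hr]
      exact hns (hsp ▸ List.getElem_mem _)

-- every word is an infix of the join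
theorem pv_mem_infix_join : ∀ (ws : List (List Char)) (w : List Char), w ∈ ws →
    w <:+: PySem.Chars.join [' '] ws := by
  intro ws
  induction ws with
  | nil => intro w h; simp at h
  | cons a rest ih =>
    intro w hw
    cases rest with
    | nil =>
      simp at hw
      subst hw
      simp [PySem.Chars.join_singleton]
    | cons b r =>
      rw [PySem.Chars.join_cons_cons]
      rcases List.mem_cons.mp hw with h | h
      · subst h; exact ⟨[], [' '] ++ PySem.Chars.join [' '] (b :: r), by simp⟩
      · exact ((ih w h).trans (List.suffix_append _ _).isInfix)

-- a spaceless nonempty token occurs in " ".join(ws) iff it occurs in some word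
theorem pv_isIn_join (tok : List Char) (htok : tok ≠ []) (hns : ' ' ∉ tok) :
    ∀ (ws : List (List Char)),
    (PySem.Chars.isIn tok (PySem.Chars.join [' '] ws) = true ↔
      ∃ w ∈ ws, PySem.Chars.isIn tok w = true) := by
  intro ws
  rw [PySem.Chars.isIn_iff_infix]
  constructor
  · intro h
    induction ws with
    | nil =>
      exfalso
      rw [PySem.Chars.join_nil] at h
      exact htok (List.eq_nil_of_infix_nil h)
    | cons a rest ih =>
      cases rest with
      | nil =>
        rw [PySem.Chars.join_singleton] at h
        exact ⟨a, by simp, (PySem.Chars.isIn_iff_infix _ _).mpr h⟩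
      | cons b r =>
        rw [PySem.Chars.join_cons_cons, List.append_assoc] at h
        rcases pv_infix_split tok a _ hns (by simpa using h) with h' | h'
        · exact ⟨a, by simp, (PySem.Chars.isIn_iff_infix _ _).mpr h'⟩
        · obtain ⟨w, hw, hin⟩ := ih h'
          exact ⟨w, by simp [hw], hin⟩
  · rintro ⟨w, hw, hin⟩
    exact ((PySem.Chars.isIn_iff_infix _ _).mp hin).trans (pv_mem_infix_join ws w hw)

-- the core equation, for an ARBITRARY word list (no property of split() is needed)
theorem pv_core (wsS : List String) :
    (let normalized := PySem.Str.join " " wsS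
     if PySem.Str.len normalized < 4 then (0 : Int)
     else
       let score : Int := 1
       let score := if 80 ≤ PySem.Str.len normalized then score + 1 else score
       let score := if 220 ≤ PySem.Str.len normalized then score + 1 else score
       let score := if pvTokens.any (fun token => PySem.Str.isIn token normalized) then score + 1 else score
       min score 4) =
    (let n : Int := (wsS.map (fun w => PySem.Str.len w)).sum + wsS.length - 1
     let length_score : Int := if n < 4 then 0 else if n < 80 then 1 else if n < 220 then 2 else 3
     let has_keyword := wsS.any (fun w => pvTokens.any (fun t => PySem.Str.isIn t w))
     length_score + (if has_keyword then 1 else 0)) := by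
  cases wsS with
  | nil => decide
  | cons w0 rest =>
    set wsS := w0 :: rest with hwsS
    set ws : List (List Char) := wsS.map String.toList with hws
    have hne : ws ≠ [] := by simp [hws, hwsS]
    -- the joined string, at the char level
    have hGood : (PySem.Str.join " " wsS).toList = PySem.Chars.join [' '] ws := by
      rw [PySem.Str.toList_join]; rfl
    -- A's length is B's n
    have hlen : PySem.Str.len (PySem.Str.join " " wsS) =
        ((ws.map List.length).sum : Int) + ws.length - 1 := by
      rw [PySem.Str.len_eq, hGood, pv_join_len ws hne]
    have hn : (wsS.map (fun w => PySem.Str.len w)).sum + (wsS.length : Int) - 1 =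
        ((ws.map List.length).sum : Int) + ws.length - 1 := by
      have h1 : (wsS.map (fun w => PySem.Str.len w)).sum
          = ((ws.map List.length).sum : Int) := by
        simp only [PySem.Str.len_eq, hws, List.map_map, Function.comp_def]
        rw [Nat.cast_list_sum, List.map_map]
        rfl
      have h2 : wsS.length = ws.length := by simp [hws]
      rw [h1, h2]
    -- the two keyword booleans agree
    have hkw : pvTokens.any (fun token => PySem.Str.isIn token (PySem.Str.join " " wsS)) =
        wsS.any (fun w => pvTokens.any (fun t => PySem.Str.isIn t w)) := by
      rw [Bool.eq_iff_iff]
      simp only [List.any_eq_true, PySem.Str.isIn_eq, hGood]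
      constructor
      · rintro ⟨tok, htok, hin⟩
        obtain ⟨h5, hnsp⟩ := pvTokens_facts tok htok
        have hne' : tok.toList ≠ [] := by intro h; rw [h] at h5; simp at h5
        obtain ⟨w, hw, hin'⟩ := (pv_isIn_join tok.toList hne' hnsp ws).mp hin
        obtain ⟨w', hw', rfl⟩ := List.mem_map.mp (hws ▸ hw)
        exact ⟨w', hw', tok, htok, hin'⟩
      · rintro ⟨w, hw, tok, htok, hin⟩
        obtain ⟨h5, hnsp⟩ := pvTokens_facts tok htok
        have hne' : tok.toList ≠ [] := by intro h; rw [h] at h5; simp at h5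
        exact ⟨tok, htok, (pv_isIn_join tok.toList hne' hnsp ws).mpr
          ⟨w.toList, by rw [hws]; exact List.mem_map.mpr ⟨w, hw, rfl⟩, hin⟩⟩
    -- a short normalized string contains no keyword
    have hsmall : ((ws.map List.length).sum : Int) + ws.length - 1 < 4 →
        wsS.any (fun w => pvTokens.any (fun t => PySem.Str.isIn t w)) = false := by
      intro h4
      by_contra hcon
      rw [Bool.not_eq_false, List.any_eq_true] at hcon
      obtain ⟨w, hw, hanyt⟩ := hcon
      rw [List.any_eq_true] at hanyt
      obtain ⟨tok, htok, hin⟩ := hanyt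
      obtain ⟨h5, _⟩ := pvTokens_facts tok htok
      rw [PySem.Str.isIn_eq, PySem.Chars.isIn_iff_infix] at hin
      have hle1 : tok.toList.length ≤ w.toList.length := hin.length_le
      have hmem2 : w.toList.length ∈ ws.map List.length := by
        rw [hws, List.map_map]
        exact List.mem_map.mpr ⟨w, hw, rfl⟩
      have hle2 : w.toList.length ≤ (ws.map List.length).sum :=
        List.single_le_sum (l := ws.map List.length) (by simp) _ hmem2
      have hge1 : 1 ≤ ws.length := by
        cases hws' : ws with
        | nil => exact absurd hws' hne
        | cons x xs => simp
      omega
    -- put it together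
    simp only [hlen, hn, hkw]
    by_cases h4 : ((ws.map List.length).sum : Int) + ws.length - 1 < 4
    · rw [if_pos h4, if_pos h4, hsmall h4]
      simp
    · rw [if_neg h4, if_neg h4]
      split_ifs <;> omega

-- ===== VERDICT (by name: the statement is the Claim_ definition above) =====
theorem analyze_message_quality_spec : Claim_equal_analyze_message_quality := by
  intro text _
  unfold Spec_analyze_message_quality analyze_message_quality analyze_message_quality_alt
  exact pv_core (PySem.Str.split₀ (PySem.Str.lower text))
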